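-- pv_equiv track=rewrite | github.com/Apress/practical-data-science-with-python-3 | ch11/count_non_repeating_digits.py | count_numbers_with_non_repeating_digits
-- ===== SOURCE A (Python) =====
-- import math
--
-- def variation_without_repetition(n, k):
--     return math.factorial(n) // math.factorial(n - k)
--
-- def count_numbers_with_non_repeating_digits(k):
--     if k < 0:
--         return 0
--     if k == 0:
--         return 1
--
--     # We can find most numbers using combinatorics.
--     digits = str(k)
--     num_digits = len(digits)
--     first_digit = int(digits[0])
--     span = 10 ** (num_digits - 1)
--
--     s = (first_digit - 1) * variation_without_repetition(9, num_digits - 1)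
--
--     # We must take care of a lower interval regarding leading zeros.
--     s += count_numbers_with_non_repeating_digits(span - 1)
--
--     # We continue our search for the upper part.
--     used_digits = {first_digit}
--     t = num_digits == 1
--
--     for i in range(1, num_digits):
--         first_digit = int(digits[i])
--         allowed_digits = set(range(first_digit + 1)) - used_digits
--         v = variation_without_repetition(9 - i, num_digits - 1 - i)
--         used_digits.add(first_digit)
--
--         if first_digit not in allowed_digits:
--             if len(allowed_digits) == 0 and i == 1:
--                 t = 0
--             else:
--                 t += len(allowed_digits) * v
--             break
--         else:
--             t += (len(allowed_digits) - (i != num_digits - 1)) * v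
--     return s + t
-- ===== SOURCE B (Python) =====
-- import math
--
--
-- def count_numbers_with_non_repeating_digits(k):
--     # Non-recursive digit-DP: closed sum over shorter lengths + one forward pass.
--     if k < 0:
--         return 0
--     digits = [int(c) for c in str(k)]
--     num_digits = len(digits)
--
--     def var(n, r):
--         return math.factorial(n) // math.factorial(n - r)
--
--     total = 1  # the number 0 itself
--     for l in range(1, num_digits):
--         total += 9 * var(9, l - 1)
--
--     used = set()
--     distinct = True
--     for i, d in enumerate(digits):
--         lo = 1 if i == 0 else 0
--         cnt = sum(1 for x in range(lo, d) if x not in used)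
--         total += cnt * var(9 - i, num_digits - 1 - i)
--         if d in used:
--             distinct = False
--             break
--         used.add(d)
--     if distinct and k > 0:
--         total += 1
--     return total
-- ===== Notes on version B (the rewrite author's own statement) =====
-- stated objective: alternative
-- what changed: Replaced A's self-recursion on span-1 and its set-difference 'allowed digits' bookkeeping by a non-recursive digit DP: a closed loop over shorter lengths (9*V(9,l-1) each, plus 1 for zero) followed by a single forward pass over the digits that counts smaller still-unused digits per position and adds 1 at the end when k itself has distinct digits.
import Mathlib
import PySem

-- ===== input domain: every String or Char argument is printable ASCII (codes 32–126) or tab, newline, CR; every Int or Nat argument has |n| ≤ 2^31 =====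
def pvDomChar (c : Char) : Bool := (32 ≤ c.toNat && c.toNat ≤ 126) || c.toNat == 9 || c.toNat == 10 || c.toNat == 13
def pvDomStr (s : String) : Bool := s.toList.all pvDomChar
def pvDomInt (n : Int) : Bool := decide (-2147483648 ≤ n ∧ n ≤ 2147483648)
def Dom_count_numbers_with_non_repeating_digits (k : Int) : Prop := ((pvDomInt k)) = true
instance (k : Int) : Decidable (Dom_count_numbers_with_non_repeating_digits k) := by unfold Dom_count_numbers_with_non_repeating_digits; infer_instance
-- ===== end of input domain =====

-- B replaces A's self-recursion by a non-recursive digit DP (closed loop over shorter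
-- lengths plus one forward pass); same cost class, no speed claim.

-- ===== PORT A =====

-- int(c) for a one-character digit string c (all indices/characters here come from str(k), so always valid)
def pvDigitVal (c : Char) : Int := (PySem.Int.ofChars? [c]).getD 0

-- math.factorial; exact for the nonnegative arguments that occur on the stated domain
def pyFactorial (n : Int) : Int := (Nat.factorial n.toNat : Int)

def variation_without_repetition (n k : Int) : Int :=
  PySem.Int.floordiv (pyFactorial n) (pyFactorial (n - k))

-- the 'for i in range(1, num_digits)' loop of A, with break modelled by returning
def aLoop (digits : List Char) (numDigits : Int) : List Int → PySem.Set Int → Int → Int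
  | [], _, t => t
  | i :: rest, used, t =>
    let first_digit := pvDigitVal (PySem.List.pyGetD digits i '0')
    let allowed := PySem.Set.diff (PySem.Set.ofList (PySem.List.pyRange 0 (first_digit + 1) 1)) used
    let v := variation_without_repetition (9 - i) (numDigits - 1 - i)
    let used' := PySem.Set.add used first_digit
    if !(PySem.Set.contains allowed first_digit) then
      if (allowed.length : Int) = 0 ∧ i = 1 then (0 : Int) else t + (allowed.length : Int) * v
    else
      aLoop digits numDigits rest used' (t + ((allowed.length : Int) - (if i ≠ numDigits - 1 then 1 else 0)) * v)

-- A's self-recursion, made structural with a fuel parameter (number of digits + 1 always suffices;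
-- the fuel-exhausted branch is never reached from count_numbers_with_non_repeating_digits)
def countAGo : Nat → Int → Int
  | 0, _ => 0
  | fuel + 1, k =>
    if k < 0 then 0
    else if k = 0 then 1
    else
      let digits := PySem.Int.toChars k
      let num_digits : Int := digits.length
      let first_digit := pvDigitVal (PySem.List.pyGetD digits 0 '0')
      let span : Int := 10 ^ (num_digits - 1).toNat
      let s := (first_digit - 1) * variation_without_repetition 9 (num_digits - 1)
               + countAGo fuel (span - 1)
      let t : Int := if num_digits = 1 then 1 else 0
      s + aLoop digits num_digits (PySem.List.pyRange 1 num_digits 1)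
            (PySem.Set.ofList [first_digit]) t

def count_numbers_with_non_repeating_digits (k : Int) : Int :=
  countAGo ((PySem.Int.toChars k).length + 1) k

-- ===== PORT B =====

-- Source B's local helper var(n, r)
def varB (n r : Int) : Int :=
  PySem.Int.floordiv (pyFactorial n) (pyFactorial (n - r))

-- Source B's 'for i, d in enumerate(digits)' pass, with break modelled by returning;
-- reaching the end of the list means distinct stayed True, hence the final '+ 1 if k > 0'
def bLoop (numDigits : Int) (k : Int) : List (Int × Int) → PySem.Set Int → Int → Int
  | [], _, total => if 0 < k then total + 1 else total
  | (i, d) :: rest, used, total =>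
    let lo : Int := if i = 0 then 1 else 0
    let cnt : Int := ((PySem.List.pyRange lo d 1).filter (fun x => !(PySem.Set.contains used x))).length
    let total' := total + cnt * varB (9 - i) (numDigits - 1 - i)
    if PySem.Set.contains used d then total'
    else bLoop numDigits k rest (PySem.Set.add used d) total'

def count_numbers_with_non_repeating_digits_alt (k : Int) : Int :=
  if k < 0 then 0
  else
    let digits := (PySem.Int.toChars k).map pvDigitVal
    let num_digits : Int := digits.length
    let total := (PySem.List.pyRange 1 num_digits 1).foldl
      (fun acc l => acc + 9 * varB 9 (l - 1)) 1
    bLoop num_digits k (PySem.List.enumerate digits 0) PySem.Set.empty total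

-- ===== PRECONDITION & SPEC =====
def Spec_count_numbers_with_non_repeating_digits (k : Int) (out : Int) : Prop := out = count_numbers_with_non_repeating_digits_alt k
instance (k : Int) (out : Int) : Decidable (Spec_count_numbers_with_non_repeating_digits k out) := by unfold Spec_count_numbers_with_non_repeating_digits; infer_instance

-- ===== CLAIM (what is proved, stated in full; the proofs are below) =====
def Claim_equal_count_numbers_with_non_repeating_digits : Prop := ∀ (k : Int), Dom_count_numbers_with_non_repeating_digits k → Spec_count_numbers_with_non_repeating_digits k (count_numbers_with_non_repeating_digits k)

-- ===== LEMMAS AND PROOFS =====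

-- ---- characterisation of str(k) (Nat.toDigits) ----

def repNat (n : Nat) : List Char :=
  if n < 10 then [Nat.digitChar n]
  else repNat (n / 10) ++ [Nat.digitChar (n % 10)]
decreasing_by exact Nat.div_lt_self (by omega) (by omega)

lemma repNat_eq (n : Nat) : repNat n =
    if n < 10 then [Nat.digitChar n]
    else repNat (n / 10) ++ [Nat.digitChar (n % 10)] := by
  rw [repNat]

lemma toDigitsCore_eq_repNat : ∀ (fuel n : Nat) (ds : List Char), n < fuel →
    Nat.toDigitsCore 10 fuel n ds = repNat n ++ ds := by
  intro fuel
  induction fuel with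
  | zero => intro n ds h; omega
  | succ f ih =>
    intro n ds h
    simp only [Nat.toDigitsCore]
    by_cases h10 : n / 10 = 0
    · have hn : n < 10 := by omega
      rw [if_pos h10, repNat_eq, if_pos hn, Nat.mod_eq_of_lt hn]
      rfl
    · have hn : ¬ n < 10 := by omega
      rw [if_neg h10, ih (n / 10) _ (by omega), repNat_eq n, if_neg hn]
      simp

lemma toChars_eq_repNat (k : Int) (h : 0 ≤ k) :
    PySem.Int.toChars k = repNat k.toNat := by
  have h' : ¬ k < 0 := by omega
  simp only [PySem.Int.toChars, if_neg h', Nat.toDigits]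
  simpa using toDigitsCore_eq_repNat (k.toNat + 1) k.toNat [] (Nat.lt_succ_self _)

lemma repNat_ne_nil (n : Nat) : repNat n ≠ [] := by
  rw [repNat_eq]
  split <;> simp

lemma repNat_length (n : Nat) : (repNat n).length = Nat.log 10 n + 1 := by
  induction n using Nat.strong_induction_on with
  | _ n ih =>
    rw [repNat_eq]
    by_cases h : n < 10
    · rw [if_pos h]
      simp [Nat.log_eq_zero_iff.mpr (Or.inl h)]
    · rw [if_neg h, List.length_append, ih (n / 10) (Nat.div_lt_self (by omega) (by omega))]
      have h1 : Nat.log 10 (n / 10) = Nat.log 10 n - 1 := Nat.log_div_base 10 n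
      have h2 : 0 < Nat.log 10 n := Nat.log_pos (by omega) (by omega)
      simp only [List.length_cons, List.length_nil]
      omega

lemma repNat_len_le (n : Nat) (h : n < 10 ^ 10) : (repNat n).length ≤ 10 := by
  rw [repNat_length]
  rcases Nat.eq_zero_or_pos n with rfl | hp
  · simp
  · have := Nat.log_lt_of_lt_pow (by omega) h
    omega

lemma repNat_head (n : Nat) : 1 ≤ n →
    ∃ d : Nat, 1 ≤ d ∧ d ≤ 9 ∧ ∃ tl, repNat n = Nat.digitChar d :: tl := by
  induction n using Nat.strong_induction_on with
  | _ n ih =>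
    intro hn
    by_cases h : n < 10
    · exact ⟨n, hn, by omega, [], by rw [repNat_eq, if_pos h]⟩
    · obtain ⟨d, h1, h9, tl, htl⟩ :=
        ih (n / 10) (Nat.div_lt_self (by omega) (by omega)) (by omega)
      exact ⟨d, h1, h9, tl ++ [Nat.digitChar (n % 10)], by
        rw [repNat_eq, if_neg h, htl]; simp⟩

lemma repNat_digits (n : Nat) : ∀ c ∈ repNat n, ∃ d : Nat, d ≤ 9 ∧ c = Nat.digitChar d := by
  induction n using Nat.strong_induction_on with
  | _ n ih =>
    intro c hc
    by_cases h : n < 10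
    · rw [repNat_eq, if_pos h] at hc
      simp only [List.mem_singleton] at hc
      exact ⟨n, by omega, hc⟩
    · rw [repNat_eq, if_neg h] at hc
      rcases List.mem_append.mp hc with h1 | h2
      · exact ih (n / 10) (Nat.div_lt_self (by omega) (by omega)) c h1
      · simp only [List.mem_singleton] at h2
        exact ⟨n % 10, by omega, h2⟩

lemma pvDigitVal_digitChar : ∀ d : Fin 10, pvDigitVal (Nat.digitChar d) = (d : Int) := by decide

lemma repNat_pow_sub_one_length (m : Nat) (hm : 1 ≤ m) :
    (repNat (10 ^ m - 1)).length = m := by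
  rw [repNat_length]
  have h1 : 10 ^ (m - 1) < 10 ^ m := Nat.pow_lt_pow_right (by omega) (by omega)
  have hp : 1 ≤ 10 ^ (m - 1) := Nat.one_le_pow _ _ (by omega)
  have hmm : m - 1 + 1 = m := by omega
  have hlog : Nat.log 10 (10 ^ m - 1) = m - 1 :=
    Nat.log_eq_of_pow_le_of_lt_pow (by omega) (by rw [hmm]; omega)
  omega

-- ---- fuel irrelevance for port A ----

def minFuel (k : Int) : Nat := if k ≤ 0 then 1 else (PySem.Int.toChars k).length + 1

lemma minFuel_le_self (k : Int) : minFuel k ≤ (PySem.Int.toChars k).length + 1 := by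
  unfold minFuel; split <;> omega

lemma minFuel_span (k : Int) (hk : 1 ≤ k) :
    minFuel (10 ^ (((PySem.Int.toChars k).length : Int) - 1).toNat - 1)
      ≤ (PySem.Int.toChars k).length := by
  have hds := toChars_eq_repNat k (by omega)
  have hL1 : 1 ≤ (PySem.Int.toChars k).length := by
    rw [hds]
    have := repNat_ne_nil k.toNat
    cases hre : repNat k.toNat with
    | nil => exact absurd hre this
    | cons a l => simp
  have he : ((((PySem.Int.toChars k).length : Int)) - 1).toNat = (PySem.Int.toChars k).length - 1 := by
    omega
  rw [he]
  rcases Nat.eq_or_lt_of_le hL1 with heq | hlt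
  · rw [← heq]
    norm_num [minFuel]
  · -- 2 ≤ length
    have hm1 : 1 ≤ (PySem.Int.toChars k).length - 1 := by omega
    have hpow : (10 : Nat) ≤ 10 ^ ((PySem.Int.toChars k).length - 1) := by
      calc (10 : Nat) = 10 ^ 1 := by norm_num
      _ ≤ 10 ^ ((PySem.Int.toChars k).length - 1) := Nat.pow_le_pow_right (by omega) hm1
    have hcast : (10 : Int) ^ ((PySem.Int.toChars k).length - 1) - 1
        = ((10 ^ ((PySem.Int.toChars k).length - 1) - 1 : Nat) : Int) := by
      push_cast [Nat.one_le_pow _ _ (by omega : 0 < 10)]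
      ring
    rw [minFuel, if_neg (by rw [hcast]; exact_mod_cast by omega)]
    rw [hcast, toChars_eq_repNat _ (by exact_mod_cast by omega : (0:Int) ≤ _)]
    have : ((((10 ^ ((PySem.Int.toChars k).length - 1) - 1 : Nat) : Int)).toNat)
        = 10 ^ ((PySem.Int.toChars k).length - 1) - 1 := by omega
    rw [this, repNat_pow_sub_one_length _ hm1]
    omega

lemma countAGo_irrel : ∀ (f g : Nat) (k : Int), minFuel k ≤ f → minFuel k ≤ g →
    countAGo f k = countAGo g k := by
  intro f
  induction f with
  | zero =>
    intro g k hf hg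
    have : 1 ≤ minFuel k := by unfold minFuel; split <;> omega
    omega
  | succ f ih =>
    intro g k hf hg
    have hone : 1 ≤ minFuel k := by unfold minFuel; split <;> omega
    obtain ⟨g', rfl⟩ : ∃ g', g = g' + 1 := ⟨g - 1, by omega⟩
    by_cases hneg : k < 0
    · simp only [countAGo, if_pos hneg]
    · by_cases h0 : k = 0
      · simp only [countAGo, if_neg hneg, if_pos h0]
      · have hk1 : 1 ≤ k := by omega
        have hmf : minFuel k = (PySem.Int.toChars k).length + 1 := by
          unfold minFuel; rw [if_neg (by omega)]
        have hsp := minFuel_span k hk1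
        simp only [countAGo, if_neg hneg, if_neg h0]
        rw [ih g' _ (by omega) (by omega)]

lemma countA_unfold (k : Int) (hk : 1 ≤ k) :
    count_numbers_with_non_repeating_digits k =
      (let digits := PySem.Int.toChars k
       let num_digits : Int := digits.length
       let first_digit := pvDigitVal (PySem.List.pyGetD digits 0 '0')
       let span : Int := 10 ^ (num_digits - 1).toNat
       (first_digit - 1) * variation_without_repetition 9 (num_digits - 1)
         + count_numbers_with_non_repeating_digits (span - 1)
         + aLoop digits num_digits (PySem.List.pyRange 1 num_digits 1)
             (PySem.Set.ofList [first_digit]) (if num_digits = 1 then 1 else 0)) := by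
  have hsp := minFuel_span k hk
  have h1 : count_numbers_with_non_repeating_digits k
      = countAGo ((PySem.Int.toChars k).length + 1) k := rfl
  rw [h1]
  simp only [countAGo, if_neg (show ¬ k < 0 by omega), if_neg (show ¬ k = 0 by omega)]
  rw [countAGo_irrel ((PySem.Int.toChars k).length)
    ((PySem.Int.toChars (10 ^ (((PySem.Int.toChars k).length : Int) - 1).toNat - 1)).length + 1)
    (10 ^ (((PySem.Int.toChars k).length : Int) - 1).toNat - 1) (by omega)
    (minFuel_le_self _)]
  rfl

lemma countA_zero : count_numbers_with_non_repeating_digits 0 = 1 := by decide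

-- ---- the lower-interval total: A on 10^m - 1 equals B's closed loop over lengths ----

lemma lowVals : ∀ m : Fin 10,
    count_numbers_with_non_repeating_digits (10 ^ (m : Nat) - 1) =
      (PySem.List.pyRange 1 (((m : Nat) : Int) + 1) 1).foldl
        (fun acc l => acc + 9 * varB 9 (l - 1)) 1 := by
  decide

-- ---- counting 'allowed' digits ----

lemma addAux (l : List Int) : ∀ acc : List Int, (∀ x ∈ l, x ∉ acc) → l.Nodup →
    List.foldl PySem.Set.add acc l = acc ++ l := by
  induction l with
  | nil => intro acc _ _; simp
  | cons x t ih =>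
    intro acc hna hnd
    have hx : x ∉ acc := hna x (List.mem_cons_self)
    have hadd : PySem.Set.add acc x = acc ++ [x] := by
      simp [PySem.Set.add, PySem.Set.contains, hx]
    rw [List.foldl_cons, hadd, ih (acc ++ [x]) ?h1 (List.Nodup.of_cons hnd)]
    · simp
    · intro y hy
      simp only [List.mem_append, List.mem_singleton]
      rintro (hya | rfl)
      · exact hna y (List.mem_cons_of_mem _ hy) hya
      · exact (List.nodup_cons.mp hnd).1 hy

lemma ofList_eq_self_of_nodup (l : List Int) (h : l.Nodup) : PySem.Set.ofList l = l := by
  have := addAux l [] (by simp) h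
  simpa [PySem.Set.ofList, PySem.Set.empty] using this

lemma allowed_eq_filter (d : Int) (used : List Int) :
    PySem.Set.diff (PySem.Set.ofList (PySem.List.pyRange 0 (d + 1) 1)) used
      = (PySem.List.pyRange 0 (d + 1) 1).filter (fun x => !(PySem.Set.contains used x)) := by
  rw [PySem.Set.diff, ofList_eq_self_of_nodup _ (PySem.List.nodup_pyRange_one _ _)]

lemma allowed_len (d : Int) (hd : 0 ≤ d) (used : List Int) :
    ((PySem.Set.diff (PySem.Set.ofList (PySem.List.pyRange 0 (d + 1) 1)) used).length : Int)
      = (((PySem.List.pyRange 0 d 1).filter (fun x => !(PySem.Set.contains used x))).length : Int)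
        + (if PySem.Set.contains used d then 0 else 1) := by
  rw [allowed_eq_filter d used,
    PySem.List.pyRange_one_succ_right (by omega : (0:Int) ≤ d),
    List.filter_append, List.length_append]
  by_cases h : d ∈ used
  · simp [PySem.Set.contains, h]
  · simp [PySem.Set.contains, h]

lemma allowed_mem (d : Int) (hd : 0 ≤ d) (used : List Int) :
    PySem.Set.contains (PySem.Set.diff (PySem.Set.ofList (PySem.List.pyRange 0 (d + 1) 1)) used) d
      = !(PySem.Set.contains used d) := by
  have hmem : d ∈ PySem.List.pyRange 0 (d + 1) 1 :=
    (PySem.List.mem_pyRange_one).mpr ⟨hd, by omega⟩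
  rw [allowed_eq_filter d used]
  simp only [PySem.Set.contains]
  by_cases h : d ∈ used
  · simp [List.mem_filter, h]
  · simp [List.mem_filter, hmem, h]

-- ---- aLoop over indices = value-list form ----

def aLoopV (L : Int) : List Int → Int → PySem.Set Int → Int → Int
  | [], _, _, t => t
  | d :: rest, i, used, t =>
    let allowed := PySem.Set.diff (PySem.Set.ofList (PySem.List.pyRange 0 (d + 1) 1)) used
    let v := variation_without_repetition (9 - i) (L - 1 - i)
    if !(PySem.Set.contains allowed d) then
      if (allowed.length : Int) = 0 ∧ i = 1 then (0 : Int) else t + (allowed.length : Int) * v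
    else
      aLoopV L rest (i + 1) (PySem.Set.add used d)
        (t + ((allowed.length : Int) - (if i ≠ L - 1 then 1 else 0)) * v)

lemma aLoop_eq_aLoopV (ds : List Char) : ∀ (j i : Nat), ds.length - i ≤ j → i ≤ ds.length →
    ∀ (used : PySem.Set Int) (t : Int),
    aLoop ds (ds.length : Int) (PySem.List.pyRange (i : Int) (ds.length : Int) 1) used t
      = aLoopV (ds.length : Int) ((ds.map pvDigitVal).drop i) (i : Int) used t := by
  intro j
  induction j with
  | zero =>
    intro i hj hi used t
    have hieq : i = ds.length := by omega
    subst hieq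
    rw [PySem.List.pyRange_one_eq_nil (le_refl _)]
    rw [show (ds.map pvDigitVal).drop ds.length = [] from by simp]
    rfl
  | succ j ihj =>
    intro i hj hi used t
    rcases Nat.eq_or_lt_of_le hi with heq | hlt
    · subst heq
      rw [PySem.List.pyRange_one_eq_nil (le_refl _)]
      rw [show (ds.map pvDigitVal).drop ds.length = [] from by simp]
      rfl
    · rw [PySem.List.pyRange_one_cons (by exact_mod_cast hlt)]
      have hget : PySem.List.pyGetD ds (i : Int) '0' = ds[i] := by
        rw [PySem.List.pyGetD_natCast]
        exact List.getD_eq_getElem ds '0' hlt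
      have hdrop : (ds.map pvDigitVal).drop i
          = pvDigitVal ds[i] :: (ds.map pvDigitVal).drop (i + 1) := by
        rw [List.drop_eq_getElem_cons (by simpa using hlt)]
        simp
      rw [hdrop]
      simp only [aLoop, aLoopV, hget]
      have hcast : ((i : Int) + 1) = ((i + 1 : Nat) : Int) := by push_cast; ring
      split_ifs
      · rfl
      · rfl
      · rw [hcast]
        exact ihj (i + 1) (by omega) (by omega) _ _
      · rw [hcast]
        exact ihj (i + 1) (by omega) (by omega) _ _

-- ---- one-step unfold equations (keep the tails opaque during rewriting) ----

lemma enum_cons (a : Int) (l : List Int) (s : Int) :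
    PySem.List.enumerate (a :: l) s = (s, a) :: PySem.List.enumerate l (s + 1) := rfl

lemma bLoop_nil (nd k : Int) (used : PySem.Set Int) (total : Int) :
    bLoop nd k [] used total = if 0 < k then total + 1 else total := rfl

lemma bLoop_cons (nd k i d : Int) (rest : List (Int × Int)) (used : PySem.Set Int) (total : Int) :
    bLoop nd k ((i, d) :: rest) used total =
      (if PySem.Set.contains used d then
        total + (((PySem.List.pyRange (if i = 0 then 1 else 0) d 1).filter
          (fun x => !(PySem.Set.contains used x))).length : Int) * varB (9 - i) (nd - 1 - i)
      else bLoop nd k rest (PySem.Set.add used d)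
        (total + (((PySem.List.pyRange (if i = 0 then 1 else 0) d 1).filter
          (fun x => !(PySem.Set.contains used x))).length : Int) * varB (9 - i) (nd - 1 - i))) := rfl

lemma aLoopV_nil (L i : Int) (used : PySem.Set Int) (t : Int) : aLoopV L [] i used t = t := rfl

lemma aLoopV_cons (L d i : Int) (rest : List Int) (used : PySem.Set Int) (t : Int) :
    aLoopV L (d :: rest) i used t =
      (if !(PySem.Set.contains (PySem.Set.diff (PySem.Set.ofList (PySem.List.pyRange 0 (d + 1) 1)) used) d) then
        (if ((PySem.Set.diff (PySem.Set.ofList (PySem.List.pyRange 0 (d + 1) 1)) used).length : Int) = 0 ∧ i = 1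
          then (0 : Int)
          else t + ((PySem.Set.diff (PySem.Set.ofList (PySem.List.pyRange 0 (d + 1) 1)) used).length : Int)
            * variation_without_repetition (9 - i) (L - 1 - i))
      else aLoopV L rest (i + 1) (PySem.Set.add used d)
        (t + (((PySem.Set.diff (PySem.Set.ofList (PySem.List.pyRange 0 (d + 1) 1)) used).length : Int)
          - (if i ≠ L - 1 then 1 else 0)) * variation_without_repetition (9 - i) (L - 1 - i))) := rfl

-- ---- main loop correspondence ----

lemma varB_eq (n r : Int) : varB n r = variation_without_repetition n r := rfl

lemma var_zero (n : Int) : variation_without_repetition n 0 = 1 := by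
  unfold variation_without_repetition pyFactorial
  rw [sub_zero]
  have h : (0 : Int) < ((n.toNat).factorial : Int) := by exact_mod_cast (n.toNat).factorial_pos
  rw [PySem.Int.floordiv_eq_ediv_of_pos h]
  exact Int.ediv_self (by omega)

lemma loopCorr : ∀ (rest : List Int) (d i : Int) (used : PySem.Set Int) (t C L k : Int),
    1 ≤ i → i + 1 + rest.length = L → 0 < k →
    0 ≤ d → (∀ v ∈ rest, 0 ≤ v) → (i = 1 → t = 0) →
    bLoop L k (PySem.List.enumerate (d :: rest) i) used (C + t)
      = C + aLoopV L (d :: rest) i used t := by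
  intro rest
  induction rest with
  | nil =>
    intro d i used t C L k hi hL hk hd _ ht
    simp only [List.length_nil, Int.natCast_zero, add_zero] at hL
    have hmem := allowed_mem d hd used
    have hlen := allowed_len d hd used
    have hv1 : variation_without_repetition (9 - i) (L - 1 - i) = 1 := by
      rw [show L - 1 - i = (0:Int) by omega, var_zero]
    have hvb : varB (9 - i) (L - 1 - i) = 1 := by rw [varB_eq, hv1]
    have hlo : ¬ (i = 0) := by omega
    have hil : ¬ (i ≠ L - 1) := by omega
    rw [enum_cons, bLoop_cons, aLoopV_cons, hmem]
    simp only [if_neg hlo, hvb, hv1, mul_one, Bool.not_not]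
    by_cases hu : PySem.Set.contains used d
    · rw [if_pos hu] at hlen
      rw [add_zero] at hlen
      simp only [if_pos hu, hlen]
      by_cases hz : ((((PySem.List.pyRange 0 d 1).filter
          (fun x => !(PySem.Set.contains used x))).length : Int) = 0 ∧ i = 1)
      · rw [if_pos hz, hz.1, ht hz.2]
        ring
      · rw [if_neg hz]
        ring
    · rw [if_neg hu] at hlen
      simp only [if_neg hu, hlen, if_neg hil, sub_zero]
      simp only [PySem.List.enumerate]
      rw [bLoop_nil, if_pos hk, aLoopV_nil]
      ring
  | cons d2 rest ih =>
    intro d i used t C L k hi hL hk hd hrest ht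
    simp only [List.length_cons] at hL
    push_cast at hL
    have hmem := allowed_mem d hd used
    have hlen := allowed_len d hd used
    have hlo : ¬ (i = 0) := by omega
    have hil : (i ≠ L - 1) := by omega
    rw [enum_cons, bLoop_cons, aLoopV_cons, hmem]
    simp only [if_neg hlo, if_pos hil, Bool.not_not, varB_eq]
    by_cases hu : PySem.Set.contains used d
    · rw [if_pos hu] at hlen
      rw [add_zero] at hlen
      simp only [if_pos hu, hlen]
      by_cases hz : ((((PySem.List.pyRange 0 d 1).filter
          (fun x => !(PySem.Set.contains used x))).length : Int) = 0 ∧ i = 1)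
      · rw [if_pos hz, hz.1, ht hz.2]
        ring
      · rw [if_neg hz]
        ring
    · rw [if_neg hu] at hlen
      simp only [if_neg hu, hlen]
      have hstep : C + t + (((PySem.List.pyRange 0 d 1).filter
            (fun x => !(PySem.Set.contains used x))).length : Int)
            * variation_without_repetition (9 - i) (L - 1 - i)
          = C + (t + (((PySem.List.pyRange 0 d 1).filter
            (fun x => !(PySem.Set.contains used x))).length : Int)
            * variation_without_repetition (9 - i) (L - 1 - i)) := by ring
      have hstep2 : ((((PySem.List.pyRange 0 d 1).filter
            (fun x => !(PySem.Set.contains used x))).length : Int) + 1 - 1)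
          = (((PySem.List.pyRange 0 d 1).filter
            (fun x => !(PySem.Set.contains used x))).length : Int) := by ring
      rw [hstep, hstep2, ih d2 (i + 1) (PySem.Set.add used d)
        (t + (((PySem.List.pyRange 0 d 1).filter
            (fun x => !(PySem.Set.contains used x))).length : Int)
            * variation_without_repetition (9 - i) (L - 1 - i)) C L k
        (by omega) (by omega) hk
        (hrest d2 (List.mem_cons_self)) (fun v hv => hrest v (List.mem_cons_of_mem _ hv))
        (by omega)]

-- ===== VERDICT (by name: the statement is the Claim_ definition above) =====
theorem count_numbers_with_non_repeating_digits_spec : Claim_equal_count_numbers_with_non_repeating_digits := by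
  intro k hdom
  unfold Spec_count_numbers_with_non_repeating_digits
  have hdom' : -2147483648 ≤ k ∧ k ≤ 2147483648 := by
    unfold Dom_count_numbers_with_non_repeating_digits pvDomInt at hdom
    exact of_decide_eq_true hdom
  by_cases hneg : k < 0
  · unfold count_numbers_with_non_repeating_digits count_numbers_with_non_repeating_digits_alt
    rw [if_pos hneg]
    simp only [countAGo, if_pos hneg]
  · by_cases h0 : k = 0
    · subst h0; decide
    · have hk1 : 1 ≤ k := by omega
      have hk0 : (0:Int) ≤ k := by omega
      have hds : PySem.Int.toChars k = repNat k.toNat := toChars_eq_repNat k hk0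
      obtain ⟨d0, hd01, hd09, tl, htl⟩ := repNat_head k.toNat (by omega)
      have hd0v : pvDigitVal (Nat.digitChar d0) = (d0 : Int) := pvDigitVal_digitChar ⟨d0, by omega⟩
      have hlen10 : (repNat k.toNat).length ≤ 10 := repNat_len_le _ (by omega)
      have hvals : ∀ c ∈ repNat k.toNat, 0 ≤ pvDigitVal c := by
        intro c hc
        obtain ⟨dd, hdd9, rfl⟩ := repNat_digits k.toNat c hc
        rw [pvDigitVal_digitChar ⟨dd, by omega⟩]
        exact_mod_cast Nat.zero_le dd
      -- B side
      unfold count_numbers_with_non_repeating_digits_alt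
      rw [if_neg hneg, hds, htl]
      simp only [List.map_cons, hd0v, List.length_cons, List.length_map]
      rw [enum_cons, bLoop_cons]
      rw [if_neg (show ¬ (PySem.Set.contains PySem.Set.empty (d0 : Int)) from by
        simp [PySem.Set.contains, PySem.Set.empty])]
      rw [if_pos rfl]
      have hcnt : (((PySem.List.pyRange 1 (d0 : Int) 1).filter
          (fun x => !(PySem.Set.contains PySem.Set.empty x))).length : Int) = (d0 : Int) - 1 := by
        simp [PySem.Set.contains, PySem.Set.empty, PySem.List.length_pyRange_one]
        omega
      rw [hcnt]
      rw [show PySem.Set.add PySem.Set.empty (d0 : Int) = [(d0 : Int)] from by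
        simp [PySem.Set.add, PySem.Set.empty, PySem.Set.contains]]
      -- A side
      rw [countA_unfold k hk1, hds, htl]
      simp only [List.length_cons]
      rw [show PySem.List.pyGetD (Nat.digitChar d0 :: tl) 0 '0' = Nat.digitChar d0 from by
        rw [show (0:Int) = ((0:Nat):Int) from rfl, PySem.List.pyGetD_natCast]; rfl]
      rw [hd0v]
      rw [show PySem.Set.ofList [(d0 : Int)] = [(d0 : Int)] from
        ofList_eq_self_of_nodup _ (by simp)]
      rw [show ((((tl.length + 1 : Nat)) : Int) - 1).toNat = tl.length from by push_cast; omega]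
      cases tl with
      | nil =>
        simp only [List.length_nil, List.map_nil, zero_add, Nat.cast_one]
        simp only [PySem.List.pyRange_one_eq_nil (le_refl (1:Int))]
        rw [if_pos trivial]
        simp only [aLoop, List.foldl_nil, PySem.List.enumerate, pow_zero]
        rw [bLoop_nil, if_pos (by omega : (0:Int) < k)]
        simp only [varB_eq, sub_zero, show (1:Int) - 1 = 0 from by norm_num, countA_zero,
          var_zero, mul_one]
        ring
      | cons c1 tl' =>
        simp only [List.length_cons, List.map_cons, zero_add]
        have hA := aLoop_eq_aLoopV (Nat.digitChar d0 :: c1 :: tl')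
          ((Nat.digitChar d0 :: c1 :: tl').length) 1 (by omega) (by simp) [(d0 : Int)] 0
        simp only [List.length_cons, List.map_cons, List.drop_succ_cons, List.drop_zero,
          Nat.cast_one] at hA
        rw [if_neg (show ¬ ((((tl'.length + 1 + 1 : Nat)) : Int) = 1) from by push_cast; omega)]
        rw [hA]
        have hcorr := loopCorr (tl'.map pvDigitVal) (pvDigitVal c1) 1 [(d0 : Int)] 0
          ((PySem.List.pyRange 1 (((tl'.length + 1 + 1 : Nat)) : Int) 1).foldl
            (fun acc l => acc + 9 * varB 9 (l - 1)) 1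
            + ((d0 : Int) - 1) * varB (9 - 0) ((((tl'.length + 1 + 1 : Nat)) : Int) - 1 - 0))
          (((tl'.length + 1 + 1 : Nat)) : Int) k
          (by omega) (by simp only [List.length_map]; push_cast; omega) (by omega)
          (by
            apply hvals
            rw [htl]
            exact List.mem_cons_of_mem _ (List.mem_cons_self))
          (by
            intro v hv
            obtain ⟨c, hc, rfl⟩ := List.mem_map.mp hv
            apply hvals
            rw [htl]
            exact List.mem_cons_of_mem _ (List.mem_cons_of_mem _ hc))
          (fun _ => rfl)
        rw [add_zero] at hcorr
        rw [hcorr]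
        have hlow := lowVals ⟨tl'.length + 1, by
          have h10 := hlen10
          rw [htl] at h10
          simp only [List.length_cons] at h10
          omega⟩
        rw [hlow]
        simp only [varB_eq, sub_zero]
        push_cast
        ring
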